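-- pv_equiv track=rewrite | github.com/aaskorohodov/interesting-stuff | Josephus_Permutation.py | permutation_slow
-- ===== SOURCE A (Python) =====
-- def permutation_slow(array: list[int], step: int) -> int:
--     """Returns position of initial list, that would be at the last index in permuted list
--
--     Args:
--         array: Initial array of elements
--         step: Step, in which elements will be popped into permuted list
--     Returns:
--         Element from initial list, that would be the at the end of permuted list"""
--
--     permutation = []
--     current_index = 0
--     while array:
--         current_index = (current_index + step - 1) % len(array)  # Let us jump to the beginning of the list
--         removed_item = array.pop(current_index)
--         permutation.append(removed_item)
--
--     return permutation[-1]
-- ===== SOURCE B (Python) =====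
-- def permutation_slow(array: list[int], step: int) -> int:
--     """O(n) Josephus: survivor index via the classic recurrence, then index
--     into the original array (does not mutate the array, unlike A)."""
--     j = 0
--     for i in range(2, len(array) + 1):
--         j = (j + step) % i
--     return array[j]
-- ===== Notes on version B (the rewrite author's own statement) =====
-- stated objective: faster
-- what changed: B replaces A's O(n^2) simulation (repeatedly popping from a shrinking list) with the O(n) Josephus survivor recurrence j=(j+step)%i and a single index into the original array; B also does not mutate the input list.
import Mathlib
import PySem

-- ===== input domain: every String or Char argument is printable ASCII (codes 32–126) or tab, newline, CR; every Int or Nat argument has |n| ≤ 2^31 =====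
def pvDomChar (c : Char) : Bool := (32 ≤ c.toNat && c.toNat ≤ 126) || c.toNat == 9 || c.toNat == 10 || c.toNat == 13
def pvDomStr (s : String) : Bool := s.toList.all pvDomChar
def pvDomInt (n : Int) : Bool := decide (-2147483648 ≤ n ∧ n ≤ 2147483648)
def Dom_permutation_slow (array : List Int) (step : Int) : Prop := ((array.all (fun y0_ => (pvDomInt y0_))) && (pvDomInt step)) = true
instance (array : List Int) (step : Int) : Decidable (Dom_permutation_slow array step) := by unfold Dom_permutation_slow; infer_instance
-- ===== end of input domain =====

-- B replaces A's pop-simulation with the Josephus survivor recurrence indexed into the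
-- original array (return value only: A empties its input list in place, B does not mutate it).

-- ===== PORT A =====
-- the while loop: pop at (c + step - 1) % len, append to `perm`, until `array` is empty
def pvLoopA (step : Int) (array : List Int) (c : Int) (perm : List Int) : List Int :=
  match h : array with
  | [] => perm
  | _ :: _ =>
    let ci := PySem.Int.mod (c + step - 1) (array.length : Int)
    match hp : PySem.List.pop? array ci with
    | some (item, rest) => pvLoopA step rest ci (perm ++ [item])
    | none => perm   -- unreachable: ci is always in range
termination_by array.length
decreasing_by
  have := PySem.List.length_of_pop?_eq_some _ hp
  simp only [h] at *
  omega

def permutation_slow (array : List Int) (step : Int) : Int :=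
  (PySem.List.pyGet? (pvLoopA step array 0 []) (-1)).getD 0   -- getD 0 only totalizes: perm[-1] raises on empty input, excluded by Pre_

-- ===== PORT B =====
def permutation_slow_alt (array : List Int) (step : Int) : Int :=
  let j := (PySem.List.pyRange 2 ((array.length : Int) + 1) 1).foldl
             (fun j i => PySem.Int.mod (j + step) i) 0
  (PySem.List.pyGet? array j).getD 0   -- getD 0 only totalizes: array[j] raises on empty input, excluded by Pre_

-- ===== PRECONDITION & SPEC =====
-- Pre_ excludes only the empty list, on which A raises IndexError (permutation[-1] on []).
def Pre_permutation_slow (array : List Int) (step : Int) : Prop := array ≠ []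
instance (array : List Int) (step : Int) : Decidable (Pre_permutation_slow array step) := by unfold Pre_permutation_slow; infer_instance
def pvWitness_permutation_slow : List Int × Int := ([1, 2, 3, 4, 5], 3)

def Spec_permutation_slow (array : List Int) (step : Int) (out : Int) : Prop := out = permutation_slow_alt array step
instance (array : List Int) (step : Int) (out : Int) : Decidable (Spec_permutation_slow array step out) := by unfold Spec_permutation_slow; infer_instance

-- ===== CLAIM (what is proved, stated in full; the proofs are below) =====
def Claim_equal_permutation_slow : Prop := ∀ (array : List Int) (step : Int), Dom_permutation_slow array step → Pre_permutation_slow array step → Spec_permutation_slow array step (permutation_slow array step)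

-- ===== LEMMAS AND PROOFS =====

-- survivor index of the n-element Josephus game with step `step` (the value B's fold computes)
def pvSurv (step : Int) : Nat → Int
  | 0 => 0
  | 1 => 0
  | (m+2) => PySem.Int.mod (pvSurv step (m+1) + step) ((m : Int) + 2)

lemma pvSurv_bounds (step : Int) : ∀ n : Nat, 1 ≤ n → 0 ≤ pvSurv step n ∧ pvSurv step n < (n : Int) := by
  intro n hn
  match n with
  | 1 => simp [pvSurv]
  | (m+2) =>
    refine ⟨PySem.Int.mod_nonneg _ (by positivity), ?_⟩
    have hdef : pvSurv step (m+2) = PySem.Int.mod (pvSurv step (m+1) + step) ((m : Int) + 2) := rfl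
    have := PySem.Int.mod_lt (pvSurv step (m+1) + step) (b := (m : Int) + 2) (by positivity)
    push_cast
    omega

lemma pvFold_eq_surv (step : Int) : ∀ n : Nat,
    (PySem.List.pyRange 2 ((n : Int) + 1) 1).foldl (fun j i => PySem.Int.mod (j + step) i) 0
      = pvSurv step n := by
  intro n
  induction n with
  | zero => rw [PySem.List.pyRange_one_eq_nil (by norm_num)]; simp [pvSurv]
  | succ m ih =>
    match m, ih with
    | 0, _ => rw [PySem.List.pyRange_one_eq_nil (by norm_num)]; simp [pvSurv]
    | (k+1), ih =>
      rw [show (((k+1+1 : Nat) : Int) + 1) = (((k+1 : Nat) : Int) + 1) + 1 by push_cast; ring,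
          PySem.List.pyRange_one_succ_right (by push_cast; omega), List.foldl_append, ih]
      show PySem.Int.mod (pvSurv step (k+1) + step) (((k+1 : Nat) : Int) + 1) = pvSurv step (k+2)
      have : (((k+1 : Nat) : Int) + 1) = ((k : Nat) : Int) + 2 := by push_cast; ring
      rw [this]
      rfl

-- pop? at a verified-in-range Int index
lemma pvPop_spec (xs : List Int) (i : Int) (h0 : 0 ≤ i) (h1 : i < (xs.length : Int)) :
    PySem.List.pop? xs i = some (xs.getD i.toNat 0, xs.eraseIdx i.toNat) := by
  obtain ⟨k, rfl⟩ : ∃ k : Nat, i = (k : Int) := ⟨i.toNat, (Int.toNat_of_nonneg h0).symm⟩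
  have hk : k < xs.length := by omega
  rw [PySem.List.pop?_natCast _ _ hk]
  simp [List.getElem?_eq_getElem hk]

-- the last element appended by A's loop is the original element at index (c + pvSurv n) % n
lemma pvLoopA_last (step : Int) : ∀ (n : Nat) (l : List Int) (c : Int) (perm : List Int),
    l.length = n → 1 ≤ n →
    (pvLoopA step l c perm).getLast?
      = some (l.getD (PySem.Int.mod (c + pvSurv step n) (n : Int)).toNat 0) := by
  intro n
  induction n with
  | zero => omega
  | succ m ih =>
    intro l c perm hlen hn
    match l, hlen with
    | (x :: t), hlen =>
      rw [pvLoopA.eq_def]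
      have hpos : (0 : Int) < ((x :: t).length : Int) := by
        simp only [List.length_cons]; positivity
      set ci := PySem.Int.mod (c + step - 1) ((x :: t).length : Int) with hci
      have hci0 : 0 ≤ ci := PySem.Int.mod_nonneg _ hpos
      have hciL : ci < ((x :: t).length : Int) := PySem.Int.mod_lt _ hpos
      have hpop := pvPop_spec (x :: t) ci hci0 hciL
      simp only
      split
      case _ item rest heq =>
        rw [hpop] at heq
        injection heq with h1
        injection h1 with h2 h3
        subst h2
        subst h3
        match m, ih with
        | 0, _ =>
          -- one element: the loop pops it and stops
          have ht : t = [] := by simpa using hlen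
          subst ht
          have hci' : ci = 0 := by
            simp only [List.length_cons, List.length_nil] at hciL
            omega
          rw [hci']
          have hsurv1 : pvSurv step 1 = 0 := rfl
          simp [pvLoopA, hsurv1]
        | (k+1), ih =>
          -- at least two elements: recurse on the popped list
          set m := k + 1 with hm
          have hmlen : ((x :: t).eraseIdx ci.toNat).length = m := by
            rw [List.length_eraseIdx_of_lt (by omega)]
            omega
          rw [ih _ ci _ hmlen (by omega)]
          -- now pure index arithmetic
          set j := pvSurv step m with hj
          obtain ⟨hj0, hjm⟩ := pvSurv_bounds step m (by omega)
          have hlen' : ((x :: t).length : Int) = (m : Int) + 1 := by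
            rw [hlen]; push_cast; ring
          have hmpos : (0 : Int) < (m : Int) := by omega
          have hm1pos : (0 : Int) < (m : Int) + 1 := by omega
          -- inner index q
          have hq : PySem.Int.mod (ci + j) (m : Int)
              = if ci + j < (m : Int) then ci + j else ci + j - m := by
            rw [PySem.Int.mod_eq_emod_of_pos hmpos]
            split_ifs with h
            · exact Int.emod_eq_of_lt (by omega) h
            · conv_lhs => rw [show ci + j = (ci + j - m) + (m : Int) * 1 by ring]
              rw [Int.add_mul_emod_self_left]
              exact Int.emod_eq_of_lt (by omega) (by omega)
          -- outer index: (c + pvSurv (m+1)) % (m+1) = shifted inner index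
          have hsurv : pvSurv step (m+1) = PySem.Int.mod (j + step) ((m : Int) + 1) := by
            rw [hj, hm]
            show pvSurv step (k+2) = _
            simp only [pvSurv]
            push_cast
            ring_nf
          have houter : PySem.Int.mod (c + pvSurv step (m+1)) (((m+1 : Nat)) : Int)
              = if ci + j < (m : Int) then ci + j + 1 else ci + j - m := by
            rw [show (((m+1 : Nat)) : Int) = (m : Int) + 1 by push_cast; ring]
            rw [hsurv, PySem.Int.mod_eq_emod_of_pos hm1pos, PySem.Int.mod_eq_emod_of_pos hm1pos]
            have e1 : c + (j + step) % ((m : Int) + 1)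
                = (c + j + step) + ((m : Int) + 1) * (-((j + step) / ((m : Int) + 1))) := by
              rw [Int.emod_def]; ring
            have e2 : ci = (c + step - 1) % ((m : Int) + 1) := by
              rw [hci, hlen', PySem.Int.mod_eq_emod_of_pos hm1pos]
            have e3 : c + j + step
                = (ci + j + 1) + ((m : Int) + 1) * ((c + step - 1) / ((m : Int) + 1)) := by
              rw [e2, Int.emod_def]; ring
            rw [e1, Int.add_mul_emod_self_left, e3, Int.add_mul_emod_self_left]
            split_ifs with h
            · exact Int.emod_eq_of_lt (by omega) (by omega)
            · conv_lhs => rw [show ci + j + 1 = (ci + j - m) + ((m : Int) + 1) * 1 by ring]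
              rw [Int.add_mul_emod_self_left]
              exact Int.emod_eq_of_lt (by omega) (by omega)
          rw [hq, houter]
          -- compare the two getD's on the original list
          have hlencons : (x :: t).length = m + 1 := hlen
          split_ifs with h
          · -- no wraparound: popped index below stays, survivor is one past
            have hqlt : (ci + j).toNat < ((x :: t).eraseIdx ci.toNat).length := by
              rw [hmlen]; omega
            have htlt : (ci + j + 1).toNat < (x :: t).length := by
              rw [hlencons]; omega
            rw [List.getD_eq_getElem _ _ hqlt, List.getD_eq_getElem _ _ htlt,
                List.getElem_eraseIdx]
            have hge : ¬ (ci + j).toNat < ci.toNat := by omega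
            rw [dif_neg hge]
            simp only [show (ci + j + 1).toNat = (ci + j).toNat + 1 from by omega]
          · -- wraparound past the popped index
            have hqlt : (ci + j - m).toNat < ((x :: t).eraseIdx ci.toNat).length := by
              rw [hmlen]; omega
            have htlt : (ci + j - m).toNat < (x :: t).length := by
              rw [hlencons]; omega
            rw [List.getD_eq_getElem _ _ hqlt, List.getD_eq_getElem _ _ htlt,
                List.getElem_eraseIdx]
            have hltp : (ci + j - m).toNat < ci.toNat := by omega
            rw [dif_pos hltp]
      case _ heq =>
        rw [hpop] at heq
        exact absurd heq (by simp)

-- ===== VERDICT (by name: the statement is the Claim_ definition above) =====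
theorem permutation_slow_spec : Claim_equal_permutation_slow := by
  intro array step _ hpre
  have hn : 1 ≤ array.length := by
    cases array with
    | nil => exact absurd rfl hpre
    | cons x t => simp
  unfold Spec_permutation_slow permutation_slow permutation_slow_alt
  obtain ⟨hs0, hsn⟩ := pvSurv_bounds step array.length hn
  simp only [pvFold_eq_surv]
  rw [PySem.List.pyGet?_neg_one,
      pvLoopA_last step array.length array 0 [] rfl hn]
  have hmod : PySem.Int.mod (0 + pvSurv step array.length) (array.length : Int)
      = pvSurv step array.length := by
    rw [PySem.Int.mod_eq_emod_of_pos (by omega), zero_add]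
    exact Int.emod_eq_of_lt hs0 hsn
  rw [hmod]
  have hlt : (pvSurv step array.length).toNat < array.length := by omega
  rw [PySem.List.pyGet?_of_nonneg _ hs0]
  simp [List.getElem?_eq_getElem hlt]
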